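-- pv_equiv track=rewrite | github.com/rahul38888/coding_practice | src/practices/practice/cutting_binary/script.py | power_of_five
-- ===== SOURCE A (Python) =====
-- def power_of_five(value):
--     temp = 5
--     while temp != value and temp < value:
--         temp *= 5
--
--     if temp == value:
--         return True
--     else:
--         return False
-- ===== SOURCE B (Python) =====
-- def power_of_five(value):
--     if value <= 0 or value % 5 != 0:
--         return False
--     while value % 5 == 0:
--         value //= 5
--     return value == 1
-- ===== Notes on version B (the rewrite author's own statement) =====
-- stated objective: idiomatic
-- what changed: Replaced A's multiply-up loop (growing temp=5,25,... toward value) with the standard divide-down test: guard non-positives and non-multiples of 5, then peel factors of 5 off value and check the residue is 1.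
import Mathlib
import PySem

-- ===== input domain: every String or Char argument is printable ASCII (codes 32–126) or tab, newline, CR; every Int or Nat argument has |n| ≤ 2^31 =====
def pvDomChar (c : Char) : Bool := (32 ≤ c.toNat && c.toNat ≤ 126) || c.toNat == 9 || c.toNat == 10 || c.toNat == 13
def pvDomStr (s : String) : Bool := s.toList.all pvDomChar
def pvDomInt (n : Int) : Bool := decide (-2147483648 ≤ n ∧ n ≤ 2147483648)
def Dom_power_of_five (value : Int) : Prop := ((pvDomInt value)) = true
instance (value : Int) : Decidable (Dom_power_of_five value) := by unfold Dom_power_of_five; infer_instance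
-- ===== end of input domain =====

-- B peels factors of 5 off `value` instead of growing a product toward it; idiomatic, same cost.

-- ===== PORT A =====
-- while temp != value and temp < value: temp *= 5
-- (the '0 < temp' conjunct only totalizes the recursion; the entry point calls it with temp = 5,
-- and every recursive call keeps temp positive, so it never changes the computed value)
def powA_loop (value temp : Int) : Int :=
  if h : 0 < temp ∧ temp ≠ value ∧ temp < value then powA_loop value (temp * 5) else temp
termination_by (value - temp).toNat
decreasing_by
  have h1 : temp + 1 ≤ temp * 5 := by nlinarith [h.1]
  have h2 := h.2.2
  omega

def power_of_five (value : Int) : Bool :=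
  if powA_loop value 5 = value then true else false

-- ===== PORT B =====
-- while value % 5 == 0: value //= 5
-- (the '0 < v' conjunct only totalizes the recursion; the entry point guards value ≤ 0,
-- and v > 0 with v % 5 = 0 gives v // 5 > 0, so it never changes the computed value)
def powB_loop (v : Int) : Int :=
  if h : 0 < v ∧ PySem.Int.mod v 5 = 0 then powB_loop (PySem.Int.floordiv v 5) else v
termination_by v.toNat
decreasing_by
  have h1 : PySem.Int.floordiv v 5 = v / 5 := PySem.Int.floordiv_eq_ediv_of_pos (by norm_num)
  have h2 : v / 5 * 5 ≤ v := Int.ediv_mul_le v (by norm_num)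
  have h3 : 0 ≤ v / 5 := Int.ediv_nonneg (le_of_lt h.1) (by norm_num)
  have h4 := h.1
  omega

def power_of_five_alt (value : Int) : Bool :=
  if value ≤ 0 ∨ PySem.Int.mod value 5 ≠ 0 then false
  else if powB_loop value = 1 then true else false

-- ===== PRECONDITION & SPEC =====
def Spec_power_of_five (value : Int) (out : Bool) : Prop := out = power_of_five_alt value
instance (value : Int) (out : Bool) : Decidable (Spec_power_of_five value out) := by unfold Spec_power_of_five; infer_instance

-- ===== CLAIM (what is proved, stated in full; the proofs are below) =====
def Claim_equal_power_of_five : Prop := ∀ (value : Int), Dom_power_of_five value → Spec_power_of_five value (power_of_five value)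

-- ===== LEMMAS AND PROOFS =====

-- A's loop, started at a positive temp, ends on value exactly when value = temp * 5^j
lemma powA_iff (value temp : Int) (ht : 0 < temp) :
    powA_loop value temp = value ↔ ∃ j : ℕ, temp * 5 ^ j = value := by
  induction temp using powA_loop.induct (value := value) with
  | case1 temp h ih =>
    rw [powA_loop, dif_pos h, ih (by nlinarith [h.1])]
    constructor
    · rintro ⟨j, hj⟩; exact ⟨j + 1, by rw [← hj]; ring⟩
    · rintro ⟨j, hj⟩
      cases j with
      | zero => simp at hj; exact absurd hj h.2.1
      | succ j => exact ⟨j, by rw [← hj]; ring⟩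
  | case2 temp h =>
    rw [powA_loop, dif_neg h]
    push_neg at h
    have hle : value ≤ temp := by
      rcases eq_or_ne temp value with he | hne
      · exact le_of_eq he.symm
      · exact h ht hne
    constructor
    · intro he; exact ⟨0, by simpa using he⟩
    · rintro ⟨j, hj⟩
      have h5 : (1 : Int) ≤ 5 ^ j := one_le_pow₀ (by norm_num)
      nlinarith [hj, h5, ht]

-- B's loop sends any power of five to 1
lemma powB_pow (n : ℕ) : powB_loop ((5 : Int) ^ n) = 1 := by
  induction n with
  | zero =>
    rw [powB_loop, dif_neg]
    · norm_num
    intro h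
    have := h.2
    rw [PySem.Int.mod_eq_emod_of_pos (by norm_num)] at this
    norm_num at this
  | succ n ih =>
    rw [powB_loop, dif_pos]
    · have hd : PySem.Int.floordiv ((5 : Int) ^ (n + 1)) 5 = 5 ^ n := by
        rw [PySem.Int.floordiv_eq_ediv_of_pos (by norm_num), pow_succ]
        exact Int.mul_ediv_cancel _ (by norm_num)
      rw [hd]; exact ih
    constructor
    · positivity
    · rw [PySem.Int.mod_eq_emod_of_pos (by norm_num), pow_succ]
      exact Int.mul_emod_left _ _

-- B's loop reaches 1 only from powers of five
lemma powB_eq_one (v : Int) (hv : 0 < v) (h1 : powB_loop v = 1) : ∃ n : ℕ, v = 5 ^ n := by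
  induction v using powB_loop.induct with
  | case1 v h ih =>
    rw [powB_loop, dif_pos h] at h1
    have hdvd : (5 : Int) ∣ v := (PySem.Int.mod_eq_zero_iff_dvd v 5).mp h.2
    have hfd : PySem.Int.floordiv v 5 = v / 5 := PySem.Int.floordiv_eq_ediv_of_pos (by norm_num)
    obtain ⟨c, hc⟩ := hdvd
    have hcpos : 0 < c := by nlinarith [h.1]
    have hdiv : v / 5 = c := by rw [hc]; exact Int.mul_ediv_cancel_left _ (by norm_num)
    obtain ⟨n, hn⟩ := ih (by rw [hfd, hdiv]; exact hcpos) (by rwa [hfd] at h1 ⊢)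
    rw [hfd, hdiv] at hn
    exact ⟨n + 1, by rw [hc, hn, pow_succ]; ring⟩
  | case2 v h =>
    rw [powB_loop, dif_neg h] at h1
    exact ⟨0, by simpa using h1⟩

-- both programs accept exactly the values 5^(j+1)
lemma powA_char (value : Int) : power_of_five value = true ↔ ∃ j : ℕ, (5 : Int) ^ (j + 1) = value := by
  rw [power_of_five]
  split_ifs with hif
  · simp only [true_iff]
    obtain ⟨j, hj⟩ := (powA_iff value 5 (by norm_num)).mp hif
    exact ⟨j, by rw [← hj, pow_succ]; ring⟩
  · simp only [false_iff]
    rintro ⟨j, hj⟩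
    exact hif ((powA_iff value 5 (by norm_num)).mpr ⟨j, by rw [← hj, pow_succ]; ring⟩)

lemma powB_char (value : Int) : power_of_five_alt value = true ↔ ∃ j : ℕ, (5 : Int) ^ (j + 1) = value := by
  rw [power_of_five_alt]
  split_ifs with hg hone
  · simp only [false_iff]
    rintro ⟨j, hj⟩
    rcases hg with hle | hmod
    · have : (0 : Int) < 5 ^ (j + 1) := by positivity
      omega
    · apply hmod
      rw [PySem.Int.mod_eq_zero_iff_dvd, ← hj]
      exact dvd_pow_self 5 j.succ_ne_zero
  · simp only [true_iff]
    push_neg at hg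
    obtain ⟨n, hn⟩ := powB_eq_one value (lt_of_not_ge (by omega)) hone
    cases n with
    | zero =>
      exfalso
      rw [hn] at hg
      have := hg.2
      rw [PySem.Int.mod_eq_emod_of_pos (by norm_num)] at this
      norm_num at this
    | succ n => exact ⟨n, hn.symm⟩
  · simp only [false_iff]
    rintro ⟨j, hj⟩
    exact hone (by rw [← hj]; exact powB_pow (j + 1))

-- ===== VERDICT (by name: the statement is the Claim_ definition above) =====
theorem power_of_five_spec : Claim_equal_power_of_five := by
  intro value _
  unfold Spec_power_of_five
  have h1 := powA_char value
  have h2 := powB_char value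
  cases hA : power_of_five value <;> cases hB : power_of_five_alt value <;> simp_all
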